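-- pv_equiv track=rewrite | github.com/JisungKim94/CodingTest | Programmers/Python/고득점 Kit/틀린답_or_느린답_or_구린답/lessons_42626_더맵게.py | solution
-- ===== SOURCE A (Python) =====
-- def solution(scoville, K):
--     answer = 0
--     while True:
--         first = scoville[scoville.index(min(scoville))]
--         scoville.pop(scoville.index(min(scoville)))
--         second = scoville[scoville.index(min(scoville))]
--         scoville.pop(scoville.index(min(scoville)))
--
--         scoville.append(first + second * 2)
--
--         answer = answer + 1
--         if len(scoville) < 2 or min(scoville) >= K:
--             if min(scoville) < K:
--                 answer = -1
--             break
--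
--     return answer
-- ===== SOURCE B (Python) =====
-- def solution(scoville, K):
--     # Return-value equivalent to A; does not mutate the caller's list (A does).
--     s = sorted(scoville)
--     count = 0
--     while True:
--         a, b, *rest = s
--         mixed = a + b * 2
--         i = 0
--         while i < len(rest) and rest[i] < mixed:
--             i += 1
--         rest.insert(i, mixed)
--         s = rest
--         count += 1
--         if len(s) < 2 or s[0] >= K:
--             return count if s[0] >= K else -1
-- ===== Notes on version B (the rewrite author's own statement) =====
-- stated objective: faster
-- what changed: B sorts the list once and then maintains the pot as a sorted list (pop the two head elements, insert the mix at its sorted position), replacing A's per-round min()+index()+pop() full scans (five scans per round) with a single insertion scan.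
import Mathlib
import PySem

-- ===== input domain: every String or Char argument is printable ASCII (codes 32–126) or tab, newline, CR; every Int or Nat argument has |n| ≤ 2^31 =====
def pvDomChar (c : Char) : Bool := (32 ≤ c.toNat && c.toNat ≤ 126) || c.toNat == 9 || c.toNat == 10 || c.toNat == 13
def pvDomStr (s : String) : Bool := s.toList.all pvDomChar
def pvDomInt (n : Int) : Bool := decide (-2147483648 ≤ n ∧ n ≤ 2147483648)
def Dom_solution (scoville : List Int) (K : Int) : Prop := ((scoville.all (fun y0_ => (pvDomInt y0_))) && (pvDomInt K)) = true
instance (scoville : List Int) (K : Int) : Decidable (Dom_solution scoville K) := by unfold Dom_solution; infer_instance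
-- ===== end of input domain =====

-- B sorts once and keeps the pot as a sorted list with in-place insertion of the mix,
-- replacing A's repeated min/index/pop scans (objective: faster, constant-factor).
-- Equivalence is about the RETURN value only: A mutates its argument list, B does not.


-- ===== PORT A =====
-- the 'while True' loop; fuel = initial length bounds the iterations (each one shrinks the list by 1).
-- Python raises (ValueError on min of the empty list) exactly when fewer than 2 elements remain to mix;
-- there the port returns the running answer — those inputs are outside Pre_solution.
def solutionA_loop : Nat → List Int → Int → Int → Int
  | 0, _, _, answer => answer
  | fuel + 1, scoville, K, answer =>
    match PySem.List.min? scoville (fun x => x) with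
    | none => answer  -- min([]) raises in Python
    | some m1 =>
      -- first = scoville[scoville.index(min(scoville))]; scoville.pop(scoville.index(min(scoville)))
      -- index/[]/pop cannot raise here: min(scoville) is a member, so the index is in range
      let first := scoville.getD (scoville.idxOf m1) 0
      let s1 := scoville.eraseIdx (scoville.idxOf m1)
      match PySem.List.min? s1 (fun x => x) with
      | none => answer  -- min([]) raises in Python
      | some m2 =>
        -- second = ...; pop of second min, then scoville.append(first + second * 2)
        let second := s1.getD (s1.idxOf m2) 0
        let s2 := s1.eraseIdx (s1.idxOf m2)
        let s3 := s2 ++ [first + second * 2]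
        let answer := answer + 1
        let m3 := ((PySem.List.min? s3 (fun x => x)).getD 0)  -- s3 is nonempty: min succeeds
        if s3.length < 2 ∨ m3 ≥ K then
          (if m3 < K then -1 else answer)
        else
          solutionA_loop fuel s3 K answer

def solution (scoville : List Int) (K : Int) : Int :=
  solutionA_loop scoville.length scoville K 0

-- ===== PORT B =====
-- insertion of the mixed value into the sorted remainder (the inner index scan + rest.insert(i, mixed))
def insSorted (x : Int) : List Int → List Int
  | [] => [x]
  | h :: t => if h < x then h :: insSorted x t else x :: h :: t

-- the 'while True' loop of B over the sorted list; fuel as in A's port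
def solutionB_loop : Nat → List Int → Int → Int → Int
  | 0, _, _, count => count
  | fuel + 1, s, K, count =>
    match s with
    | a :: b :: rest =>
      let s' := insSorted (a + b * 2) rest
      let count := count + 1
      match s' with
      | m :: _ =>
        if s'.length < 2 ∨ m ≥ K then (if m ≥ K then count else -1)
        else solutionB_loop fuel s' K count
      | [] => count  -- unreachable: insSorted never returns []
    | _ => count  -- unpacking 'a, b, *rest = s' raises in Python; outside Pre_solution

def solution_alt (scoville : List Int) (K : Int) : Int :=
  solutionB_loop scoville.length (PySem.List.sorted scoville (fun x => x) false) K 0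

-- ===== PRECONDITION & SPEC =====
-- A raises (IndexError/ValueError from min/index on a too-short list) when scoville has fewer than 2 elements.
def Pre_solution (scoville : List Int) (_K : Int) : Prop := 2 ≤ scoville.length
instance (scoville : List Int) (K : Int) : Decidable (Pre_solution scoville K) := by unfold Pre_solution; infer_instance
def pvWitness_solution : List Int × Int := ([1, 2, 3, 9, 10, 12], 7)

def Spec_solution (scoville : List Int) (K : Int) (out : Int) : Prop := out = solution_alt scoville K
instance (scoville : List Int) (K : Int) (out : Int) : Decidable (Spec_solution scoville K out) := by unfold Spec_solution; infer_instance

-- ===== CLAIM (what is proved, stated in full; the proofs are below) =====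
def Claim_equal_solution : Prop := ∀ (scoville : List Int) (K : Int), Dom_solution scoville K → Pre_solution scoville K → Spec_solution scoville K (solution scoville K)

-- ===== LEMMAS AND PROOFS =====

-- min? of any permutation of a sorted list a :: t is its head a
lemma min?_of_perm_sorted {l t : List Int} {a : Int}
    (hp : l.Perm (a :: t)) (hs : (a :: t).Pairwise (· ≤ ·)) :
    PySem.List.min? l (fun x => x) = some a := by
  have hne : l ≠ [] := by
    intro h
    have := hp.length_eq
    simp [h] at this
  obtain ⟨c, t', rfl⟩ : ∃ c t', l = c :: t' := by
    cases l with
    | nil => exact absurd rfl hne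
    | cons c t' => exact ⟨c, t', rfl⟩
  cases hm : PySem.List.min? (c :: t') (fun x => x) with
  | none => rw [PySem.List.min?_id_cons] at hm; exact (Option.some_ne_none _ hm).elim
  | some m =>
    have hmem : m ∈ c :: t' := PySem.List.min?_mem hm
    have hmin : ∀ y ∈ c :: t', m ≤ y := PySem.List.min?_isMin hm
    have h1 : m ≤ a := hmin a (hp.mem_iff.mpr (by simp))
    have h2 : a ≤ m := by
      rcases List.mem_cons.mp (hp.mem_iff.mp hmem) with rfl | hyt
      · exact le_refl _
      · exact (List.pairwise_cons.mp hs).1 m hyt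
    rw [le_antisymm h1 h2]

-- l[l.index(v)] = v for a member v
lemma getD_idxOf {l : List Int} {v : Int} (h : v ∈ l) : l.getD (l.idxOf v) 0 = v := by
  rw [List.getD_eq_getElem _ _ (List.idxOf_lt_length_of_mem h)]
  exact List.getElem_idxOf (List.idxOf_lt_length_of_mem h)

-- popping at the index of a member = erasing its first occurrence
lemma eraseIdx_idxOf {l : List Int} {v : Int} (_h : v ∈ l) : l.eraseIdx (l.idxOf v) = l.erase v := by
  exact List.eraseIdx_idxOf_eq_erase v l

lemma insSorted_perm (x : Int) (t : List Int) : (insSorted x t).Perm (x :: t) := by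
  induction t with
  | nil => rfl
  | cons h t ih =>
    by_cases hc : h < x
    · simp only [insSorted, if_pos hc]
      exact (ih.cons h).trans (List.Perm.swap x h t)
    · simp [insSorted, hc]

lemma insSorted_pairwise {t : List Int} (x : Int) (h : t.Pairwise (· ≤ ·)) :
    (insSorted x t).Pairwise (· ≤ ·) := by
  induction t with
  | nil => simp [insSorted]
  | cons b t ih =>
    rcases List.pairwise_cons.mp h with ⟨hall, ht⟩
    by_cases hc : b < x
    · simp only [insSorted, if_pos hc]
      refine List.pairwise_cons.mpr ⟨?_, ih ht⟩
      intro y hy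
      rcases List.mem_cons.mp ((insSorted_perm x t).mem_iff.mp hy) with rfl | hyt
      · exact le_of_lt hc
      · exact hall y hyt
    · have hc' : x ≤ b := not_lt.mp hc
      simp only [insSorted, if_neg hc]
      refine List.pairwise_cons.mpr ⟨?_, h⟩
      intro y hy
      rcases List.mem_cons.mp hy with rfl | hyt
      · exact hc'
      · exact le_trans hc' (hall y hyt)

-- main loop invariant: A's pot is a permutation of B's sorted pot
lemma loop_eq (fuel : Nat) : ∀ (l s : List Int) (K ans : Int),
    l.Perm s → s.Pairwise (· ≤ ·) →
    solutionA_loop fuel l K ans = solutionB_loop fuel s K ans := by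
  induction fuel with
  | zero => intro l s K ans _ _; rfl
  | succ fuel ih =>
    intro l s K ans hp hs
    match s with
    | [] =>
      have hl : l = [] := by
        have := hp.length_eq; simpa using this
      subst hl
      simp [solutionA_loop, solutionB_loop, PySem.List.min?]
    | [a] =>
      have hl : l = [a] := List.perm_singleton.mp hp
      subst hl
      simp [solutionA_loop, solutionB_loop, PySem.List.min?]
    | a :: b :: rest =>
      have hps : (b :: rest).Pairwise (· ≤ ·) := hs.of_cons
      have hmem_a : a ∈ l := hp.mem_iff.mpr (by simp)
      have h1 : PySem.List.min? l (fun x => x) = some a := min?_of_perm_sorted hp hs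
      have hp1 : (l.erase a).Perm (b :: rest) := by
        have := hp.erase a
        simpa using this
      have hmem_b : b ∈ l.erase a := hp1.mem_iff.mpr (by simp)
      have h2 : PySem.List.min? (l.erase a) (fun x => x) = some b := min?_of_perm_sorted hp1 hps
      have hp2 : ((l.erase a).erase b).Perm rest := by
        have := hp1.erase b
        simpa using this
      have hp3 : (((l.erase a).erase b) ++ [a + b * 2]).Perm (insSorted (a + b * 2) rest) := by
        refine (hp2.append_right [a + b * 2]).trans ?_
        refine (List.perm_append_comm).trans ?_
        exact (insSorted_perm (a + b * 2) rest).symm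
      have hs3 : (insSorted (a + b * 2) rest).Pairwise (· ≤ ·) := insSorted_pairwise _ hps.of_cons
      cases hse : insSorted (a + b * 2) rest with
      | nil =>
        exfalso
        have := (insSorted_perm (a + b * 2) rest).length_eq
        rw [hse] at this
        simp at this
      | cons m tl =>
        rw [hse] at hp3 hs3
        have h3 : PySem.List.min? (((l.erase a).erase b) ++ [a + b * 2]) (fun x => x) = some m :=
          min?_of_perm_sorted hp3 hs3
        have hlen : (((l.erase a).erase b) ++ [a + b * 2]).length = tl.length + 1 := by
          simpa using hp3.length_eq
        simp only [solutionA_loop, solutionB_loop, hse, h1, h2, h3,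
          getD_idxOf hmem_a, eraseIdx_idxOf hmem_a, getD_idxOf hmem_b, eraseIdx_idxOf hmem_b,
          Option.getD_some, hlen, List.length_cons]
        by_cases hbig : tl.length + 1 < 2 ∨ m ≥ K
        · rw [if_pos hbig, if_pos hbig]
          by_cases hk : m < K
          · rw [if_pos hk, if_neg (not_le.mpr hk)]
          · rw [if_neg hk, if_pos (not_lt.mp hk)]
        · rw [if_neg hbig, if_neg hbig, ← hse]
          rw [← hse] at hp3 hs3
          exact ih _ _ K (ans + 1) hp3 hs3

-- ===== VERDICT (by name: the statement is the Claim_ definition above) =====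
theorem solution_spec : Claim_equal_solution := by
  intro scoville K _ _
  unfold Spec_solution solution solution_alt
  have hperm : scoville.Perm (PySem.List.sorted scoville (fun x => x) false) :=
    (PySem.List.sorted_perm scoville (fun x => x) false).symm
  rw [hperm.length_eq]
  exact loop_eq _ _ _ _ _ hperm (by
    have := PySem.List.sorted_pairwise scoville (fun x => x)
    simpa using this)
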